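-- pv_equiv track=rewrite | github.com/TabeaSonnenschein/Spatial-Agent-based-Modeling-of-Urban-Health-Interventions | NLP Knowledge Extraction and Synthesis/10_syntactical_relation_learning_preparation.py | check_if_varcombi_same_dependency_subtree
-- ===== SOURCE A (Python) =====
-- def check_if_varcombi_same_dependency_subtree(varlist_varcombi, totalsentence_varlist, subtrees):
--     """ Checks whether the variable combination is part of the same dependency subtree."""
--     joined_instance = 0
--     missing_var = "NaN"
--     remaining_var = [i for i in totalsentence_varlist if (i not in varlist_varcombi) and (i != "NaN")]
--     variables = [x for x in varlist_varcombi if x != "NaN"]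
--     for a in range(0, len(subtrees)):
--         if all([True if x in subtrees[a] else False for x in variables]):
--             joined_instance += 1
--             if any([True if x in subtrees[a] else False for x in remaining_var]):
--                 missing_var = "1"
--             else:
--                 missing_var = "0"
--     if joined_instance > 0:
--         return "1", missing_var
--     else:
--         return "0", missing_var
-- ===== SOURCE B (Python) =====
-- def check_if_varcombi_same_dependency_subtree(varlist_varcombi, totalsentence_varlist, subtrees):
--     """ Checks whether the variable combination is part of the same dependency subtree."""
--     vars_set = {x for x in varlist_varcombi if x != "NaN"}
--     rem_set = {i for i in totalsentence_varlist if i not in varlist_varcombi and i != "NaN"}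
--     # scan back-to-front: the first match from the end is the one that decides
--     # missing_var, and its existence decides the joined flag -- early exit.
--     for st in reversed(subtrees):
--         st_set = set(st)
--         if vars_set <= st_set:
--             return "1", ("1" if rem_set & st_set else "0")
--     return "0", "NaN"
-- ===== Notes on version B (the rewrite author's own statement) =====
-- stated objective: faster
-- what changed: Replaces A's fused forward loop (count every matching subtree, re-scan remaining_var and overwrite missing_var at each match) with set-based containment tests and a back-to-front scan that early-exits at the first matching subtree from the end, deciding both outputs from that single subtree.
import Mathlib
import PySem

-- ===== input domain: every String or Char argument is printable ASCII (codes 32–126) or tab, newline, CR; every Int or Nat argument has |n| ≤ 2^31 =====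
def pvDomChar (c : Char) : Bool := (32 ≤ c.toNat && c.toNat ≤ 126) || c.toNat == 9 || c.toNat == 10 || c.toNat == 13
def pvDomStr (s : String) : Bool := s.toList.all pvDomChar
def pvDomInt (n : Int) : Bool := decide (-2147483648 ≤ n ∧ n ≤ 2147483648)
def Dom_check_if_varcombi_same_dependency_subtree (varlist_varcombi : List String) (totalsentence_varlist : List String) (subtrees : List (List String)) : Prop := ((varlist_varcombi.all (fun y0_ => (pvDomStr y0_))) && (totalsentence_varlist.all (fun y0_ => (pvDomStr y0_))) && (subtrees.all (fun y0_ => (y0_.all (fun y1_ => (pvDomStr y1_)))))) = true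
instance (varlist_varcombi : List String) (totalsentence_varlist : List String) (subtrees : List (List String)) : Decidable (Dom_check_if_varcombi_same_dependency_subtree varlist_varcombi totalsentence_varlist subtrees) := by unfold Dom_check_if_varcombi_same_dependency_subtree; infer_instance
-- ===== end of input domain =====

-- B replaces A's fused forward counting loop with set-based containment tests and a
-- back-to-front scan that early-exits at the first match from the end (which is the
-- subtree A's loop would have decided by); same return value, no counting.
-- ===== PORT A =====
-- Port of A: one fused loop over the subtrees, counting joined_instance and overwriting missing_var.
def check_if_varcombi_same_dependency_subtree (varlist_varcombi : List String) (totalsentence_varlist : List String) (subtrees : List (List String)) : String × String :=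
  let remaining_var := totalsentence_varlist.filter (fun i => !(varlist_varcombi.contains i) && !(i == "NaN"))
  let vars_ := varlist_varcombi.filter (fun x => !(x == "NaN"))
  let st := subtrees.foldl (fun (s : Int × String) tree =>
      if vars_.all (fun x => tree.contains x) then
        (s.1 + 1, if remaining_var.any (fun x => tree.contains x) then "1" else "0")
      else s) (0, "NaN")
  if st.1 > 0 then ("1", st.2) else ("0", st.2)

-- ===== PORT B =====
-- B's loop over reversed(subtrees) with early return: structural recursion.
def pvScanRev (vars_set rem_set : PySem.Set String) : List (List String) → String × String
  | [] => ("0", "NaN")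
  | st :: rest =>
    let st_set := PySem.Set.ofList st
    if PySem.Set.issubset vars_set st_set then
      ("1", if PySem.Set.inter rem_set st_set ≠ [] then "1" else "0")
    else pvScanRev vars_set rem_set rest

-- Port of B: build the two sets, then scan the subtrees back-to-front.
def check_if_varcombi_same_dependency_subtree_alt (varlist_varcombi : List String) (totalsentence_varlist : List String) (subtrees : List (List String)) : String × String :=
  let vars_set : PySem.Set String := PySem.Set.ofList (varlist_varcombi.filter (fun x => !(x == "NaN")))
  let rem_set : PySem.Set String := PySem.Set.ofList (totalsentence_varlist.filter (fun i => !(varlist_varcombi.contains i) && !(i == "NaN")))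
  pvScanRev vars_set rem_set subtrees.reverse

-- ===== PRECONDITION & SPEC =====
def Spec_check_if_varcombi_same_dependency_subtree (varlist_varcombi : List String) (totalsentence_varlist : List String) (subtrees : List (List String)) (out : String × String) : Prop := out = check_if_varcombi_same_dependency_subtree_alt varlist_varcombi totalsentence_varlist subtrees
instance (varlist_varcombi : List String) (totalsentence_varlist : List String) (subtrees : List (List String)) (out : String × String) : Decidable (Spec_check_if_varcombi_same_dependency_subtree varlist_varcombi totalsentence_varlist subtrees out) := by unfold Spec_check_if_varcombi_same_dependency_subtree; infer_instance

-- ===== CLAIM =====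
def Claim_equal_check_if_varcombi_same_dependency_subtree : Prop := ∀ (varlist_varcombi : List String) (totalsentence_varlist : List String) (subtrees : List (List String)), Dom_check_if_varcombi_same_dependency_subtree varlist_varcombi totalsentence_varlist subtrees → Spec_check_if_varcombi_same_dependency_subtree varlist_varcombi totalsentence_varlist subtrees (check_if_varcombi_same_dependency_subtree varlist_varcombi totalsentence_varlist subtrees)

-- ===== LEMMAS AND PROOFS =====

-- set-membership tests equal the list-membership tests they replace
theorem pv_issubset_eq (vs st : List String) :
    PySem.Set.issubset (PySem.Set.ofList vs) (PySem.Set.ofList st)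
      = vs.all (fun x => st.contains x) := by
  rw [Bool.eq_iff_iff]
  simp [PySem.Set.issubset_iff, PySem.Set.mem_ofList, List.all_eq_true]

theorem pv_inter_ne_iff (rem st : List String) :
    (PySem.Set.inter (PySem.Set.ofList rem) (PySem.Set.ofList st) ≠ [])
      ↔ rem.any (fun x => st.contains x) = true := by
  constructor
  · intro h
    rcases List.exists_mem_of_ne_nil _ h with ⟨x, hx⟩
    rw [PySem.Set.mem_inter] at hx
    rw [List.any_eq_true]
    rw [PySem.Set.mem_ofList] at hx
    refine ⟨x, hx.1, ?_⟩
    simp only [List.contains_iff_mem]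
    rw [PySem.Set.mem_ofList] at hx
    exact hx.2
  · intro h hnil
    rw [List.any_eq_true] at h
    rcases h with ⟨x, hx, hst⟩
    have hmem : x ∈ PySem.Set.inter (PySem.Set.ofList rem) (PySem.Set.ofList st) := by
      rw [PySem.Set.mem_inter, PySem.Set.mem_ofList, PySem.Set.mem_ofList]
      exact ⟨hx, by simpa [List.contains_iff_mem] using hst⟩
    rw [hnil] at hmem
    exact (List.not_mem_nil) hmem

-- B's scan, characterised as find? on the scanned list
theorem pv_scan_char (vs rem : List String) (l : List (List String)) :
    pvScanRev (PySem.Set.ofList vs) (PySem.Set.ofList rem) l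
      = match l.find? (fun st => vs.all (fun x => st.contains x)) with
        | none => ("0", "NaN")
        | some st => ("1", if rem.any (fun x => st.contains x) then "1" else "0") := by
  induction l with
  | nil => simp [pvScanRev]
  | cons t ts ih =>
    by_cases h : (vs.all (fun x => t.contains x)) = true
    · rw [show List.find? (fun st => vs.all (fun x => st.contains x)) (t::ts) = some t from List.find?_cons_of_pos h]
      simp only [pvScanRev, pv_issubset_eq, h, if_true]
      by_cases hi : rem.any (fun x => t.contains x) = true
      · rw [if_pos (pv_inter_ne_iff rem t |>.mpr hi), if_pos hi]
      · rw [if_neg (fun hc => hi (pv_inter_ne_iff rem t |>.mp hc)), if_neg hi]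
    · rw [show List.find? (fun st => vs.all (fun x => st.contains x)) (t::ts) = List.find? (fun st => vs.all (fun x => st.contains x)) ts from List.find?_cons_of_neg h]
      simpa only [pvScanRev, pv_issubset_eq, h, if_false] using ih

-- head? of a filter is find?
theorem pv_head?_filter {α : Type} (p : α → Bool) (l : List α) :
    (l.filter p).head? = l.find? p := by
  induction l with
  | nil => rfl
  | cons a l ih =>
    by_cases h : p a = true
    · rw [List.filter_cons_of_pos h, List.find?_cons_of_pos h, List.head?_cons]
    · rw [List.filter_cons_of_neg (by simp [h]), List.find?_cons_of_neg h, ih]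

-- last match scanning forward = first match scanning backward
theorem pv_getLast?_filter {α : Type} (p : α → Bool) (l : List α) :
    (l.filter p).getLast? = l.reverse.find? p := by
  rw [← pv_head?_filter, List.filter_reverse, List.head?_reverse]

-- A's loop state, characterised by the filtered list
theorem pv_fold_char (vs rem : List String)
    (ts : List (List String)) (j : Int) (m : String) :
    ts.foldl (fun (s : Int × String) tree =>
        if vs.all (fun x => tree.contains x) then
          (s.1 + 1, if rem.any (fun x => tree.contains x) then "1" else "0")
        else s) (j, m)
      = (j + ((ts.filter (fun tree => vs.all (fun x => tree.contains x))).length : Int),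
         (((ts.filter (fun tree => vs.all (fun x => tree.contains x))).getLast?).map
            (fun tree => if rem.any (fun x => tree.contains x) then "1" else "0")).getD m) := by
  induction ts generalizing j m with
  | nil => simp
  | cons t ts ih =>
    by_cases h : (vs.all (fun x => t.contains x)) = true
    · simp only [List.foldl_cons, h, if_true, List.filter_cons, ih, List.getLast?_cons,
                 List.length_cons, Option.map_some, Option.getD_some]
      cases hl : (ts.filter (fun tree => vs.all (fun x => tree.contains x))).getLast? <;>
        simp only [Option.map_none, Option.map_some, Option.getD_none, Option.getD_some,
                   Prod.mk.injEq] <;>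
        exact ⟨by push_cast; ring, rfl⟩
    · simp only [List.foldl_cons, h, if_false, Bool.false_eq_true, List.filter_cons, ih]

-- ===== VERDICT =====
theorem check_if_varcombi_same_dependency_subtree_spec : Claim_equal_check_if_varcombi_same_dependency_subtree := by
  intro v t s _
  unfold Spec_check_if_varcombi_same_dependency_subtree
  unfold check_if_varcombi_same_dependency_subtree check_if_varcombi_same_dependency_subtree_alt
  simp only [pv_fold_char, pv_scan_char, ← pv_getLast?_filter]
  cases hl : (s.filter (fun tree => (v.filter (fun x => !(x == "NaN"))).all (fun x => tree.contains x))).getLast? with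
  | none =>
    have h0 := List.getLast?_eq_none_iff.mp hl
    rw [h0]
    simp
  | some l =>
    have hne : s.filter (fun tree => (v.filter (fun x => !(x == "NaN"))).all (fun x => tree.contains x)) ≠ [] := by
      intro h0; rw [h0] at hl; simp at hl
    have hlen : 0 < (s.filter (fun tree => (v.filter (fun x => !(x == "NaN"))).all (fun x => tree.contains x))).length :=
      List.length_pos_iff.mpr hne
    have hpos : (0:Int) + ((s.filter (fun tree => (v.filter (fun x => !(x == "NaN"))).all (fun x => tree.contains x))).length : Int) > 0 := by
      omega
    rw [if_pos hpos]
    rfl
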